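-- pv_equiv track=rewrite | github.com/zhiyuan8/qnn | onnx/data_translations.py | is_expand_dims
-- ===== SOURCE A (Python) =====
-- def is_expand_dims(input_shape, output_shape):
--     def remove_ones(shape):
--         new_shape = [dim for dim in shape if dim!=1]
--         return new_shape
--
--     # input_dims_remove_ones, output_dims_remove_ones are in order
--     input_dims_remove_ones = remove_ones(input_shape)
--     output_dims_remove_ones = remove_ones(output_shape)
--
--     if input_dims_remove_ones == output_dims_remove_ones:
--         if len(input_shape) < len(output_shape):
--             return True
--     return False
-- ===== SOURCE B (Python) =====
-- def is_expand_dims(input_shape, output_shape):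
--     # single two-pointer walk over both shapes, skipping dims equal to 1
--     i, j = 0, 0
--     n, m = len(input_shape), len(output_shape)
--     while True:
--         while i < n and input_shape[i] == 1:
--             i += 1
--         while j < m and output_shape[j] == 1:
--             j += 1
--         if i < n and j < m:
--             if input_shape[i] != output_shape[j]:
--                 return False
--             i += 1
--             j += 1
--         else:
--             break
--     return i == n and j == m and n < m
-- ===== Notes on version B (the rewrite author's own statement) =====
-- stated objective: alternative
-- what changed: Replaced the two filtered-list builds plus list equality with a single two-pointer walk that skips 1-dims in both shapes and compares the non-1 dims in lockstep, with early exit on first mismatch.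
import Mathlib
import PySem

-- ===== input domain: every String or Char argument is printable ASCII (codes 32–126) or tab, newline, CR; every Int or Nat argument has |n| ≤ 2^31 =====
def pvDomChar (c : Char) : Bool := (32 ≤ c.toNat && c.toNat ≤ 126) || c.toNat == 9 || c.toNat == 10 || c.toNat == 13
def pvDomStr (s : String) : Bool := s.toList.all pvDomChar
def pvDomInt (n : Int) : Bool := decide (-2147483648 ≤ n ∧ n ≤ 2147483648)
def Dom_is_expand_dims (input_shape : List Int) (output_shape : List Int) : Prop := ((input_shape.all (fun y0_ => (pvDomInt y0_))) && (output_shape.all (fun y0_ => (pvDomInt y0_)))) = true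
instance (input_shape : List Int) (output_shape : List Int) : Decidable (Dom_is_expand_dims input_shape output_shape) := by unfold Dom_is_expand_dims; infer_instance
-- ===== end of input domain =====

-- B replaces the two filtered-list builds with one two-pointer walk skipping 1-dims; same cost, no intermediate lists.

-- ===== PORT A =====
def is_expand_dims (input_shape : List Int) (output_shape : List Int) : Bool :=
  -- remove_ones(shape) = [dim for dim in shape if dim != 1]
  let input_dims_remove_ones := input_shape.filter (fun dim => dim != 1)
  let output_dims_remove_ones := output_shape.filter (fun dim => dim != 1)
  if input_dims_remove_ones == output_dims_remove_ones then
    if input_shape.length < output_shape.length then true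
    else false
  else false

-- ===== PORT B =====
-- the two-pointer walk of Source B: skip 1s on either side, compare current non-1 dims in lockstep
def pvWalk : List Int → List Int → Bool
  | 1 :: xs, ys => pvWalk xs ys
  | xs, 1 :: ys => pvWalk xs ys
  | x :: xs, y :: ys => x == y && pvWalk xs ys
  | [], [] => true
  | _, _ => false

def is_expand_dims_alt (input_shape : List Int) (output_shape : List Int) : Bool :=
  pvWalk input_shape output_shape && decide (input_shape.length < output_shape.length)

-- ===== PRECONDITION & SPEC =====
def Spec_is_expand_dims (input_shape : List Int) (output_shape : List Int) (out : Bool) : Prop := out = is_expand_dims_alt input_shape output_shape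
instance (input_shape : List Int) (output_shape : List Int) (out : Bool) : Decidable (Spec_is_expand_dims input_shape output_shape out) := by unfold Spec_is_expand_dims; infer_instance

-- ===== CLAIM (what is proved, stated in full; the proofs are below) =====
def Claim_equal_is_expand_dims : Prop := ∀ (input_shape : List Int) (output_shape : List Int), Dom_is_expand_dims input_shape output_shape → Spec_is_expand_dims input_shape output_shape (is_expand_dims input_shape output_shape)

-- ===== LEMMAS AND PROOFS =====
-- the walk succeeds iff the 1-filtered shapes are equal
lemma pvWalk_eq_filter (xs ys : List Int) :
    pvWalk xs ys = (xs.filter (fun dim => dim != 1) == ys.filter (fun dim => dim != 1)) := by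
  fun_induction pvWalk xs ys with
  | case1 xs ys ih => rw [ih]; simp [List.filter_cons]
  | case2 xs ys hx ih => rw [ih]; simp [List.filter_cons]
  | case3 x xs y ys hx hy ih =>
      have hx1 : (x != 1) = true := by simpa using hx
      have hy1 : (y != 1) = true := by simpa using hy
      rw [ih]
      simp [List.filter_cons, hx1, hy1, List.cons_eq_cons, Bool.and_comm]
  | case4 => simp
  | case5 xs ys h1 h2 h3 h4 =>
      -- leftover case: exactly one list is empty and the other's head is not 1
      cases xs with
      | nil =>
        cases ys with
        | nil => exact (h4 rfl rfl).elim
        | cons y ys =>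
          have hy : (y != 1) = true := by simpa using fun h => h2 ys (by rw [h])
          simp [List.filter_cons, hy]
      | cons x xs =>
        have hx : (x != 1) = true := by simpa using fun h => h1 xs (by rw [h])
        cases ys with
        | nil => simp [List.filter_cons, hx]
        | cons y ys => exact (h3 x xs y ys rfl rfl).elim

-- ===== VERDICT (by name: the statement is the Claim_ definition above) =====
theorem is_expand_dims_spec : Claim_equal_is_expand_dims := by
  intro a b _
  unfold Spec_is_expand_dims is_expand_dims is_expand_dims_alt
  rw [pvWalk_eq_filter]
  by_cases h : a.filter (fun dim => dim != 1) = b.filter (fun dim => dim != 1) <;>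
    simp [h]
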